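-- pv_equiv track=rewrite | github.com/Zaaachary/CODING | Archive/220715.ms.青蛙吵架.py | solution_dp
-- ===== SOURCE A (Python) =====
-- def solution_dp(blocks):
--     dp_up = [1] * len(blocks) # up
--     dp_down = [1] * len(blocks) # down
--
--     for i in range(1, len(blocks)):
--         if blocks[i] >= blocks[i-1]:
--             dp_up[i] = dp_up[i-1] + 1
--         else:
--             dp_up[i] = 1
--
--     for i in range(1, len(blocks)):
--         if blocks[i] <= blocks[i-1]:
--             dp_down[i] = dp_down[i-1] + 1
--         else:
--             dp_down[i] = 1
--
--     max_len = 0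
--     for i in range(1, len(blocks)):
--         temp = dp_up[i]
--         start_idx = i - temp + 1
--         max_len = max(dp_down[start_idx] + dp_up[i] - 1, max_len)
--     return max_len
-- ===== SOURCE B (Python) =====
-- def solution_dp(blocks):
--     max_len = 0
--     up = down = down_at_up_start = 1
--     for prev, cur in zip(blocks, blocks[1:]):
--         if cur < prev:
--             up = 1
--             down += 1
--             down_at_up_start = down
--         else:
--             up += 1
--             down = down + 1 if cur == prev else 1
--         max_len = max(max_len, down_at_up_start + up - 1)
--     return max_len
-- ===== Notes on version B (the rewrite author's own statement) =====
-- stated objective: simpler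
-- what changed: Replaced A's three index loops over two O(n) dp arrays by a single pass over adjacent pairs maintaining four scalars (current up-run length, down-run length, down-run length at the up-run's start, running maximum), eliminating both arrays.
import Mathlib
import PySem

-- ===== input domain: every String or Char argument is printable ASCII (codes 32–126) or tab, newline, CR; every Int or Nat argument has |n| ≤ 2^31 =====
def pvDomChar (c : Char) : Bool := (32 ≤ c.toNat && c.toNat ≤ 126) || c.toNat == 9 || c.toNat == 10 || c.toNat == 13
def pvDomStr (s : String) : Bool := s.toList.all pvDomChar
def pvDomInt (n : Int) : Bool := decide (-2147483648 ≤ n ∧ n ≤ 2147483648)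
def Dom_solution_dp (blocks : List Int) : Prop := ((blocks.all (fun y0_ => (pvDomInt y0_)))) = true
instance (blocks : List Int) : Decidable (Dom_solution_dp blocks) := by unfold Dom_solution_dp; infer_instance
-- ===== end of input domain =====

-- B replaces A's three index loops and two dp arrays by one pass over adjacent pairs with
-- four scalar accumulators; objective: simpler (O(1) extra space instead of two O(n) arrays).

-- ===== PORT A =====
-- the three loop bodies of A, factored out under names (same code, same values)
def pvUpStep (blocks : List Int) (dp : List Int) (i : Int) : List Int :=
  if PySem.List.pyGetD blocks i 0 ≥ PySem.List.pyGetD blocks (i-1) 0 then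
    PySem.List.pySetD dp i (PySem.List.pyGetD dp (i-1) 0 + 1)
  else
    PySem.List.pySetD dp i 1

def pvDownStep (blocks : List Int) (dp : List Int) (i : Int) : List Int :=
  if PySem.List.pyGetD blocks i 0 ≤ PySem.List.pyGetD blocks (i-1) 0 then
    PySem.List.pySetD dp i (PySem.List.pyGetD dp (i-1) 0 + 1)
  else
    PySem.List.pySetD dp i 1

def pvMaxStep (dp_up dp_down : List Int) (max_len : Int) (i : Int) : Int :=
  let temp := PySem.List.pyGetD dp_up i 0
  let start_idx := i - temp + 1
  max (PySem.List.pyGetD dp_down start_idx 0 + PySem.List.pyGetD dp_up i 0 - 1) max_len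

def solution_dp (blocks : List Int) : Int :=
  let n : Int := blocks.length
  let dp_up0 : List Int := PySem.List.pyRepeat [1] n
  let dp_down0 : List Int := PySem.List.pyRepeat [1] n
  let dp_up := (PySem.List.pyRange 1 n 1).foldl (pvUpStep blocks) dp_up0
  let dp_down := (PySem.List.pyRange 1 n 1).foldl (pvDownStep blocks) dp_down0
  (PySem.List.pyRange 1 n 1).foldl (pvMaxStep dp_up dp_down) 0

-- ===== PORT B =====
-- one fold over zip(blocks, blocks[1:]) (blocks[1:] = blocks.drop 1, exact since the slice start is 1 ≥ 0);
-- state = (up, down, down_at_up_start, max_len)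
def pvAltStep (s : Int × Int × Int × Int) (pc : Int × Int) : Int × Int × Int × Int :=
  let up := s.1; let down := s.2.1; let das := s.2.2.1; let maxLen := s.2.2.2
  let prev := pc.1; let cur := pc.2
  if cur < prev then
    (1, down + 1, down + 1, max maxLen ((down + 1) + 1 - 1))
  else
    let up' := up + 1
    let down' := if cur = prev then down + 1 else 1
    (up', down', das, max maxLen (das + up' - 1))

def solution_dp_alt (blocks : List Int) : Int :=
  ((blocks.zip (blocks.drop 1)).foldl pvAltStep (1, 1, 1, 0)).2.2.2

-- ===== PRECONDITION & SPEC =====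
def Spec_solution_dp (blocks : List Int) (out : Int) : Prop := out = solution_dp_alt blocks
instance (blocks : List Int) (out : Int) : Decidable (Spec_solution_dp blocks out) := by unfold Spec_solution_dp; infer_instance

-- ===== CLAIM (what is proved, stated in full; the proofs are below) =====
def Claim_equal_solution_dp : Prop := ∀ (blocks : List Int), Dom_solution_dp blocks → Spec_solution_dp blocks (solution_dp blocks)

-- ===== LEMMAS AND PROOFS =====

-- reference run lengths: upF i / downF i = length of the nondecreasing / nonincreasing run ending at i
def upF (bs : List Int) : Nat → Int
  | 0 => 1
  | i + 1 => if bs.getD (i + 1) 0 ≥ bs.getD i 0 then upF bs i + 1 else 1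

def downF (bs : List Int) : Nat → Int
  | 0 => 1
  | i + 1 => if bs.getD (i + 1) 0 ≤ bs.getD i 0 then downF bs i + 1 else 1

-- start index of the nondecreasing run ending at i
def startF (bs : List Int) : Nat → Nat
  | 0 => 0
  | i + 1 => if bs.getD (i + 1) 0 ≥ bs.getD i 0 then startF bs i else i + 1

-- running maximum of A's third loop after processing indices 1..k
def mF (bs : List Int) : Nat → Int
  | 0 => 0
  | i + 1 => max (downF bs (startF bs (i + 1)) + upF bs (i + 1) - 1) (mF bs i)

theorem startF_le (bs : List Int) (i : Nat) : startF bs i ≤ i := by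
  induction i with
  | zero => simp [startF]
  | succ i ih => simp only [startF]; split <;> omega

theorem startF_eq (bs : List Int) (i : Nat) : (startF bs i : Int) = i + 1 - upF bs i := by
  induction i with
  | zero => simp [startF, upF]
  | succ i ih =>
    simp only [startF, upF]
    split <;> push_cast <;> omega

theorem getD_set_ite (l : List Int) (i j : Nat) (a : Int) (h : i < l.length) :
    (l.set i a).getD j 0 = if j = i then a else l.getD j 0 := by
  simp only [List.getD, List.getElem?_set]
  split
  · next he => subst he; rw [if_pos rfl]; rfl
  · rw [if_neg (by omega)]

-- dp-array loop invariant, generic in the step (instantiated by pvUpStep / pvDownStep)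
theorem fold_run (S : List Int → Int → List Int) (c : Int → Bool) (F : Nat → Int) (n : Nat)
    (hS : ∀ dp i, S dp i =
      if c i then PySem.List.pySetD dp i (PySem.List.pyGetD dp (i-1) 0 + 1)
      else PySem.List.pySetD dp i 1)
    (hF0 : F 0 = 1)
    (hFs : ∀ i : Nat, F (i + 1) = if c (((i + 1 : Nat) : Int)) then F i + 1 else 1) :
    ∀ k : Nat, k ≤ n →
      ((PySem.List.pyRange 1 (k : Int) 1).foldl S (List.replicate n (1 : Int))).length = n ∧
      ∀ j : Nat, j < n →
        ((PySem.List.pyRange 1 (k : Int) 1).foldl S (List.replicate n (1 : Int))).getD j 0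
          = if j < k then F j else 1 := by
  intro k
  induction k with
  | zero =>
    intro _
    rw [PySem.List.pyRange_one_eq_nil (by norm_num)]
    refine ⟨by simp, ?_⟩
    intro j hj
    rw [List.foldl_nil, if_neg (by omega)]
    exact List.getD_replicate 1 hj
  | succ k ih =>
    intro hk
    rcases Nat.eq_zero_or_pos k with hk0 | hkpos
    · subst hk0
      rw [show ((1 : Nat) : Int) = 1 by norm_num, PySem.List.pyRange_one_eq_nil (by norm_num)]
      refine ⟨by simp, ?_⟩
      intro j hj
      rw [List.foldl_nil]
      by_cases hj0 : j < 1
      · rw [if_pos hj0, show j = 0 by omega, hF0]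
        exact List.getD_replicate 1 (by omega)
      · rw [if_neg hj0]
        exact List.getD_replicate 1 hj
    · obtain ⟨m, rfl⟩ : ∃ m, k = m + 1 := ⟨k - 1, by omega⟩
      obtain ⟨hlen, hval⟩ := ih (by omega)
      have hsplit : PySem.List.pyRange 1 (((m + 1 : Nat) : Int) + 1) 1
          = PySem.List.pyRange 1 ((m + 1 : Nat) : Int) 1 ++ [((m + 1 : Nat) : Int)] :=
        PySem.List.pyRange_one_succ_right (by push_cast; omega)
      rw [show (((m + 1 + 1 : Nat)) : Int) = ((m + 1 : Nat) : Int) + 1 by push_cast; ring, hsplit,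
        List.foldl_append, List.foldl_cons, List.foldl_nil, hS]
      set L := (PySem.List.pyRange 1 ((m + 1 : Nat) : Int) 1).foldl S (List.replicate n (1 : Int)) with hL
      have hkn : m + 1 < n := by omega
      have hprev : PySem.List.pyGetD L (((m + 1 : Nat) : Int) - 1) 0 = F m := by
        rw [show ((m + 1 : Nat) : Int) - 1 = ((m : Nat) : Int) by push_cast; ring,
          PySem.List.pyGetD_natCast, hval m (by omega), if_pos (by omega)]
      by_cases hc : c ((m + 1 : Nat) : Int) = true
      · rw [if_pos hc, hprev]
        simp only [PySem.List.pySetD_natCast]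
        refine ⟨by simp [hlen], ?_⟩
        intro j hj
        rw [getD_set_ite _ _ _ _ (by omega), hval j hj]
        by_cases hjk : j = m + 1
        · subst hjk
          rw [if_pos rfl, if_pos (by omega), hFs m, if_pos hc]
        · rw [if_neg hjk]
          by_cases hjlt : j < m + 1
          · rw [if_pos hjlt, if_pos (by omega)]
          · rw [if_neg hjlt, if_neg (by omega)]
      · rw [if_neg hc]
        simp only [PySem.List.pySetD_natCast]
        refine ⟨by simp [hlen], ?_⟩
        intro j hj
        rw [getD_set_ite _ _ _ _ (by omega), hval j hj]
        by_cases hjk : j = m + 1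
        · subst hjk
          rw [if_pos rfl, if_pos (by omega), hFs m, if_neg hc]
        · rw [if_neg hjk]
          by_cases hjlt : j < m + 1
          · rw [if_pos hjlt, if_pos (by omega)]
          · rw [if_neg hjlt, if_neg (by omega)]

-- the third loop computes mF
theorem fold_max (bs du dd : List Int)
    (hu : ∀ j : Nat, j < bs.length → du.getD j 0 = upF bs j)
    (hd : ∀ j : Nat, j < bs.length → dd.getD j 0 = downF bs j) :
    ∀ k : Nat, k ≤ bs.length →
      (PySem.List.pyRange 1 (k : Int) 1).foldl (pvMaxStep du dd) 0 = mF bs (k - 1) := by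
  intro k
  induction k with
  | zero => intro _; rw [PySem.List.pyRange_one_eq_nil (by norm_num)]; simp [mF]
  | succ k ih =>
    intro hk
    rcases Nat.eq_zero_or_pos k with hk0 | hkpos
    · subst hk0
      rw [show ((1 : Nat) : Int) = 1 by norm_num, PySem.List.pyRange_one_eq_nil (by norm_num)]
      simp [mF]
    · obtain ⟨m, rfl⟩ : ∃ m, k = m + 1 := ⟨k - 1, by omega⟩
      have hsplit : PySem.List.pyRange 1 (((m + 1 : Nat) : Int) + 1) 1
          = PySem.List.pyRange 1 ((m + 1 : Nat) : Int) 1 ++ [((m + 1 : Nat) : Int)] :=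
        PySem.List.pyRange_one_succ_right (by push_cast; omega)
      rw [show (((m + 1 + 1 : Nat)) : Int) = ((m + 1 : Nat) : Int) + 1 by push_cast; ring, hsplit,
        List.foldl_append, List.foldl_cons, List.foldl_nil, ih (by omega)]
      have hkn : m + 1 < bs.length := by omega
      have hu' : PySem.List.pyGetD du ((m + 1 : Nat) : Int) 0 = upF bs (m + 1) := by
        rw [PySem.List.pyGetD_natCast, hu _ hkn]
      have hidx : ((m + 1 : Nat) : Int) - upF bs (m + 1) + 1 = ((startF bs (m + 1) : Nat) : Int) := by
        rw [startF_eq]; push_cast; ring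
      have hd' : PySem.List.pyGetD dd (((m + 1 : Nat) : Int) - upF bs (m + 1) + 1) 0
          = downF bs (startF bs (m + 1)) := by
        rw [hidx, PySem.List.pyGetD_natCast, hd _ (by have := startF_le bs (m + 1); omega)]
      simp only [pvMaxStep, hu', hd']
      rfl

-- A computes mF at n-1
theorem solution_dp_eq_mF (bs : List Int) : solution_dp bs = mF bs (bs.length - 1) := by
  have hrep : PySem.List.pyRepeat [(1 : Int)] (bs.length : Int) = List.replicate bs.length (1 : Int) := by
    rw [PySem.List.pyRepeat_singleton]; simp
  have hup := fold_run (pvUpStep bs)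
      (fun i => decide (PySem.List.pyGetD bs i 0 ≥ PySem.List.pyGetD bs (i-1) 0))
      (upF bs) bs.length
      (by intro dp i; by_cases h : PySem.List.pyGetD bs i 0 ≥ PySem.List.pyGetD bs (i-1) 0 <;>
        simp [pvUpStep, h])
      rfl
      (by intro i
          have h1 : (((i + 1 : Nat)) : Int) - 1 = ((i : Nat) : Int) := by push_cast; ring
          simp only [h1, PySem.List.pyGetD_natCast, decide_eq_true_eq]
          simp only [upF])
      bs.length (le_refl _)
  have hdn := fold_run (pvDownStep bs)
      (fun i => decide (PySem.List.pyGetD bs i 0 ≤ PySem.List.pyGetD bs (i-1) 0))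
      (downF bs) bs.length
      (by intro dp i; by_cases h : PySem.List.pyGetD bs i 0 ≤ PySem.List.pyGetD bs (i-1) 0 <;>
        simp [pvDownStep, h])
      rfl
      (by intro i
          have h1 : (((i + 1 : Nat)) : Int) - 1 = ((i : Nat) : Int) := by push_cast; ring
          simp only [h1, PySem.List.pyGetD_natCast, decide_eq_true_eq]
          simp only [downF])
      bs.length (le_refl _)
  show (PySem.List.pyRange 1 (bs.length : Int) 1).foldl
      (pvMaxStep
        ((PySem.List.pyRange 1 (bs.length : Int) 1).foldl (pvUpStep bs) (PySem.List.pyRepeat [1] (bs.length : Int)))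
        ((PySem.List.pyRange 1 (bs.length : Int) 1).foldl (pvDownStep bs) (PySem.List.pyRepeat [1] (bs.length : Int))))
      0 = mF bs (bs.length - 1)
  rw [hrep]
  exact fold_max bs _ _
    (fun j hj => by rw [(hup.2 j hj), if_pos hj])
    (fun j hj => by rw [(hdn.2 j hj), if_pos hj])
    bs.length (le_refl _)

-- B-side: adjacent pairs as an indexed list
theorem zip_eq_map_range (bs : List Int) :
    bs.zip (bs.drop 1) = (List.range (bs.length - 1)).map (fun i => (bs.getD i 0, bs.getD (i+1) 0)) := by
  apply List.ext_getElem
  · simp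
  · intro i h1 h2
    simp only [List.length_zip, List.length_drop] at h1
    simp only [List.getElem_zip, List.getElem_map, List.getElem_range, List.getElem_drop]
    rw [List.getD_eq_getElem _ _ (by omega), List.getD_eq_getElem _ _ (by omega)]
    have : 1 + i = i + 1 := by omega
    simp [this]

-- B's loop invariant: after k pairs the state is (upF k, downF k, downF (startF k), mF k)
theorem alt_fold_inv (bs : List Int) (k : Nat) :
    ((List.range k).map (fun i => (bs.getD i 0, bs.getD (i+1) 0))).foldl pvAltStep (1, 1, 1, 0)
      = (upF bs k, downF bs k, downF bs (startF bs k), mF bs k) := by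
  induction k with
  | zero => simp [upF, downF, startF, mF]
  | succ k ih =>
    rw [List.range_succ, List.map_append, List.foldl_append, ih]
    simp only [List.map_cons, List.map_nil, List.foldl_cons, List.foldl_nil, pvAltStep]
    by_cases h : bs.getD (k+1) 0 < bs.getD k 0
    · rw [if_pos h]
      have hup : upF bs (k+1) = 1 := by
        simp only [upF]; rw [if_neg (by omega)]
      have hdn : downF bs (k+1) = downF bs k + 1 := by
        simp only [downF]; rw [if_pos (by omega)]
      have hst : startF bs (k+1) = k + 1 := by
        simp only [startF]; rw [if_neg (by omega)]
      simp only [mF, hst, hup, hdn]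
      rw [Int.max_comm]
    · rw [if_neg h]
      have hup : upF bs (k+1) = upF bs k + 1 := by
        simp only [upF]; rw [if_pos (by omega)]
      have hdn : downF bs (k+1) = if bs.getD (k+1) 0 = bs.getD k 0 then downF bs k + 1 else 1 := by
        by_cases he : bs.getD (k+1) 0 = bs.getD k 0
        · simp only [downF]; rw [if_pos (by omega), if_pos he]
        · simp only [downF]; rw [if_neg (by omega), if_neg he]
      have hst : startF bs (k+1) = startF bs k := by
        simp only [startF]; rw [if_pos (by omega)]
      simp only [mF, hst, hup, hdn]
      rw [Int.max_comm]

theorem solution_dp_alt_eq_mF (bs : List Int) : solution_dp_alt bs = mF bs (bs.length - 1) := by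
  show ((bs.zip (bs.drop 1)).foldl pvAltStep (1, 1, 1, 0)).2.2.2 = mF bs (bs.length - 1)
  rw [zip_eq_map_range, alt_fold_inv]

-- ===== VERDICT (by name: the statement is the Claim_ definition above) =====
theorem solution_dp_spec : Claim_equal_solution_dp := by
  intro blocks _
  show solution_dp blocks = solution_dp_alt blocks
  rw [solution_dp_eq_mF, solution_dp_alt_eq_mF]
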